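-- pv_equiv track=rewrite | github.com/CaseOLAP/caseolap_lift | utils/other_functions.py | map_top_proteins2go
-- ===== SOURCE A (Python) =====
-- def map_top_proteins2go(protein_DIS, protein2go, go_tree_of_interest, go_id2term):
--     protein2go_DIS, go2protein_DIS, go_ids_DIS, go_terms_DIS = dict(), dict(), dict(), dict()
--
--     # Each protein
--     for protein, values in protein_DIS.items():
--         if len(values) == 0: continue
--
--         # Each GO term for this type of tree
--         try: go_ids = protein2go[protein]
--         except: continue
--         for go_id in go_ids:
--             if go_id in go_tree_of_interest:
--
--                 # Protein -> GO, GO Term ID, GO Term Name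
--                 protein2go_DIS.setdefault(protein,list()).append(go_id)
--                 go2protein_DIS.setdefault(go_id,list()).append(protein)
--                 go_ids_DIS[go_id] = go_ids_DIS.get(go_id, 0) + 1
--                 go_term = go_id2term[go_id]
--                 go_terms_DIS[go_term] = go_terms_DIS.get(go_term, 0) + 1
--
--
--     go_ids_DIS = dict(sorted(go_ids_DIS.items(), key = lambda x:x[1], reverse=True))
--     go_terms_DIS = dict(sorted(go_terms_DIS.items(), key = lambda x:x[1], reverse = True))
--
--     return protein2go_DIS, go2protein_DIS, go_ids_DIS, go_terms_DIS
-- ===== SOURCE B (Python) =====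
-- def map_top_proteins2go(protein_DIS, protein2go, go_tree_of_interest, go_id2term):
--     # Flatten the mapping into one list of counted (protein, go_id) occurrences.
--     occs = [(p, g)
--             for p, values in protein_DIS.items() if values and p in protein2go
--             for g in protein2go[p] if g in go_tree_of_interest]
--     ps = [p for p, _ in occs]
--     gs = [g for _, g in occs]
--     # Derive every output declaratively from occs: dedup keys in first-occurrence
--     # order, then gather/count by scanning occs, instead of incremental dicts.
--     protein2go_DIS = {p: [g for q, g in occs if q == p] for p in dict.fromkeys(ps)}
--     go2protein_DIS = {g: [p for p, h in occs if h == g] for g in dict.fromkeys(gs)}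
--     go_ids_DIS = {g: gs.count(g) for g in dict.fromkeys(gs)}
--     terms = [go_id2term[g] for g in gs]
--     go_terms_DIS = {t: terms.count(t) for t in dict.fromkeys(terms)}
--     go_ids_DIS = dict(sorted(go_ids_DIS.items(), key=lambda x: x[1], reverse=True))
--     go_terms_DIS = dict(sorted(go_terms_DIS.items(), key=lambda x: x[1], reverse=True))
--     return protein2go_DIS, go2protein_DIS, go_ids_DIS, go_terms_DIS
-- ===== Notes on version B (the rewrite author's own statement) =====
-- stated objective: alternative
-- what changed: B first flattens the input into one list of counted (protein, go_id) occurrences, then derives each of the four outputs declaratively by comprehensions over that list (dedup keys in first-occurrence order, then gather/count by scanning), instead of A's single imperative pass that incrementally updates four dicts per occurrence.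
import Mathlib
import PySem

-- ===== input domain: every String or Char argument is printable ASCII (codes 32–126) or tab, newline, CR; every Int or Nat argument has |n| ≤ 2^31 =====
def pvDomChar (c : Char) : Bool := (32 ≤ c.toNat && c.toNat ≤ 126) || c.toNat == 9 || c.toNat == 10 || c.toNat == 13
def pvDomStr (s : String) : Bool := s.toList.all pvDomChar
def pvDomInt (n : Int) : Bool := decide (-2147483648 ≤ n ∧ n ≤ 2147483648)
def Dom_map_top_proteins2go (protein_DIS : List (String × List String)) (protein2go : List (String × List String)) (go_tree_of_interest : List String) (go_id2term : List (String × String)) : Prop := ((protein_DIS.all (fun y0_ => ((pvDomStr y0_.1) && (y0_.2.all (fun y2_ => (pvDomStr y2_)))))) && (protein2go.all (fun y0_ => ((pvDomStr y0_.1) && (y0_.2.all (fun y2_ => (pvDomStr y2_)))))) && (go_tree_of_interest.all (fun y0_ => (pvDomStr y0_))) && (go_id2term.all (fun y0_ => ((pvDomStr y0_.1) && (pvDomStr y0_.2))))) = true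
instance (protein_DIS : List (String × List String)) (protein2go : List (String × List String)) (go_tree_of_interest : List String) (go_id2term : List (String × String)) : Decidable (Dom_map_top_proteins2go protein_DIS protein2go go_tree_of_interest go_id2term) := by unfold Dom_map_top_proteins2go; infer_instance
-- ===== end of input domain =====

-- B flattens the input into one list of counted (protein, go_id) occurrences and derives all
-- four outputs declaratively from it by dedup/gather/count comprehensions, instead of A's
-- single imperative pass updating four dicts per occurrence (objective: alternative).
-- Both Pythons raise KeyError on a counted GO id missing from go_id2term; Pre_ excludes those inputs.

-- go_id2term[g]; Python raises KeyError where the lookup misses — those inputs are outside Pre_,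
-- so the "" default is never the value used on admitted inputs.
def pvTerm (i2t : List (String × String)) (g : String) : String :=
  (PySem.Dict.mk i2t).getD g ""

-- ===== PORT A =====
-- the body of A's inner loop: the four dict updates for one (protein, go_id) occurrence
def pvStepA (i2t : List (String × String))
    (st : PySem.Dict String (List String) × PySem.Dict String (List String) × PySem.Dict String Int × PySem.Dict String Int)
    (q : String × String) :
    PySem.Dict String (List String) × PySem.Dict String (List String) × PySem.Dict String Int × PySem.Dict String Int :=
  (st.1.modify q.1 [] (fun v => v ++ [q.2]),          -- protein2go_DIS.setdefault(protein,[]).append(go_id)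
   st.2.1.modify q.2 [] (fun v => v ++ [q.1]),        -- go2protein_DIS.setdefault(go_id,[]).append(protein)
   st.2.2.1.modify q.2 0 (fun c => c + 1),            -- go_ids_DIS[go_id] = go_ids_DIS.get(go_id,0) + 1
   st.2.2.2.modify (pvTerm i2t q.2) 0 (fun c => c + 1)) -- go_terms_DIS[go_term] = go_terms_DIS.get(go_term,0) + 1

def map_top_proteins2go (protein_DIS : List (String × List String)) (protein2go : List (String × List String)) (go_tree_of_interest : List String) (go_id2term : List (String × String)) : (List (String × List String)) × (List (String × List String)) × (List (String × Int)) × (List (String × Int)) :=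
  let d := protein_DIS.foldl (fun st pv =>
      if pv.2 = [] then st                                  -- if len(values) == 0: continue
      else match (PySem.Dict.mk protein2go).get? pv.1 with  -- try: go_ids = protein2go[protein]
        | none => st                                        -- except: continue
        | some go_ids => go_ids.foldl (fun st g =>
            if g ∈ go_tree_of_interest then pvStepA go_id2term st (pv.1, g) else st) st)
    (PySem.Dict.empty, PySem.Dict.empty, PySem.Dict.empty, PySem.Dict.empty)
  (d.1.items, d.2.1.items,
   (PySem.Dict.ofList (PySem.List.sorted d.2.2.1.items (fun x => x.2) true)).items,
   (PySem.Dict.ofList (PySem.List.sorted d.2.2.2.items (fun x => x.2) true)).items)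

-- ===== PORT B =====
def map_top_proteins2go_alt (protein_DIS : List (String × List String)) (protein2go : List (String × List String)) (go_tree_of_interest : List String) (go_id2term : List (String × String)) : (List (String × List String)) × (List (String × List String)) × (List (String × Int)) × (List (String × Int)) :=
  -- occs = [(p, g) for p, values in protein_DIS.items() if values and p in protein2go
  --               for g in protein2go[p] if g in go_tree_of_interest]
  let occs := protein_DIS.flatMap (fun pv =>
    if pv.2 ≠ [] ∧ (PySem.Dict.mk protein2go).contains pv.1 then
      (((PySem.Dict.mk protein2go).getD pv.1 []).filter (fun g => decide (g ∈ go_tree_of_interest))).map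
        (fun g => (pv.1, g))
    else [])
  let ps := occs.map (fun q => q.1)
  let gs := occs.map (fun q => q.2)
  -- {p: [g for q, g in occs if q == p] for p in dict.fromkeys(ps)}
  let p2gDIS := (PySem.Set.ofList ps).map (fun p => (p, (occs.filter (fun q => q.1 == p)).map (fun q => q.2)))
  -- {g: [p for p, h in occs if h == g] for g in dict.fromkeys(gs)}
  let g2pDIS := (PySem.Set.ofList gs).map (fun g => (g, (occs.filter (fun q => q.2 == g)).map (fun q => q.1)))
  -- {g: gs.count(g) for g in dict.fromkeys(gs)}
  let gids := (PySem.Set.ofList gs).map (fun g => (g, (gs.count g : Int)))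
  -- terms = [go_id2term[g] for g in gs]
  let terms := gs.map (fun g => pvTerm go_id2term g)
  -- {t: terms.count(t) for t in dict.fromkeys(terms)}
  let gterms := (PySem.Set.ofList terms).map (fun t => (t, (terms.count t : Int)))
  (p2gDIS, g2pDIS,
   (PySem.Dict.ofList (PySem.List.sorted gids (fun x => x.2) true)).items,
   (PySem.Dict.ofList (PySem.List.sorted gterms (fun x => x.2) true)).items)

-- ===== PRECONDITION & SPEC =====
-- Pre_ excludes exactly the inputs on which Python A raises: a KeyError from go_id2term[go_id]
-- for some counted occurrence (non-skipped protein, go_id in the tree of interest).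
def Pre_map_top_proteins2go (protein_DIS : List (String × List String)) (protein2go : List (String × List String)) (go_tree_of_interest : List String) (go_id2term : List (String × String)) : Prop :=
  ∀ pv ∈ protein_DIS, pv.2 ≠ [] →
    ∀ g ∈ (((PySem.Dict.mk protein2go).get? pv.1).getD []), g ∈ go_tree_of_interest →
      ((PySem.Dict.mk go_id2term).get? g).isSome
instance (protein_DIS : List (String × List String)) (protein2go : List (String × List String)) (go_tree_of_interest : List String) (go_id2term : List (String × String)) : Decidable (Pre_map_top_proteins2go protein_DIS protein2go go_tree_of_interest go_id2term) := by unfold Pre_map_top_proteins2go; infer_instance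

def pvWitness_map_top_proteins2go : (List (String × List String)) × (List (String × List String)) × List String × (List (String × String)) :=
  ([("p", ["disease1"])], [("p", ["g1", "g2"])], ["g1"], [("g1", "term1")])

def Spec_map_top_proteins2go (protein_DIS : List (String × List String)) (protein2go : List (String × List String)) (go_tree_of_interest : List String) (go_id2term : List (String × String)) (out : (List (String × List String)) × (List (String × List String)) × (List (String × Int)) × (List (String × Int))) : Prop := out = map_top_proteins2go_alt protein_DIS protein2go go_tree_of_interest go_id2term
instance (protein_DIS : List (String × List String)) (protein2go : List (String × List String)) (go_tree_of_interest : List String) (go_id2term : List (String × String)) (out : (List (String × List String)) × (List (String × List String)) × (List (String × Int)) × (List (String × Int))) : Decidable (Spec_map_top_proteins2go protein_DIS protein2go go_tree_of_interest go_id2term out) := by unfold Spec_map_top_proteins2go; infer_instance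

-- ===== CLAIM (what is proved, stated in full; the proofs are below) =====
def Claim_equal_map_top_proteins2go : Prop := ∀ (protein_DIS : List (String × List String)) (protein2go : List (String × List String)) (go_tree_of_interest : List String) (go_id2term : List (String × String)), Dom_map_top_proteins2go protein_DIS protein2go go_tree_of_interest go_id2term → Pre_map_top_proteins2go protein_DIS protein2go go_tree_of_interest go_id2term → Spec_map_top_proteins2go protein_DIS protein2go go_tree_of_interest go_id2term (map_top_proteins2go protein_DIS protein2go go_tree_of_interest go_id2term)

-- ===== LEMMAS AND PROOFS =====

-- the per-protein block of counted occurrences, in A's branch shape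
def pvBlock (p2gd : PySem.Dict String (List String)) (tree : List String) (pv : String × List String) : List (String × String) :=
  if pv.2 = [] then []
  else match p2gd.get? pv.1 with
    | none => []
    | some gids => (gids.filter (fun g => decide (g ∈ tree))).map (fun g => (pv.1, g))

def pvOccs (pd : List (String × List String)) (p2g : List (String × List String)) (tree : List String) : List (String × String) :=
  pd.flatMap (pvBlock (PySem.Dict.mk p2g) tree)

-- B's comprehension-shaped block equals A's branch-shaped block
theorem pvBlock_eq (p2g : List (String × List String)) (tree : List String) (pv : String × List String) :
    (if pv.2 ≠ [] ∧ (PySem.Dict.mk p2g).contains pv.1 then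
      (((PySem.Dict.mk p2g).getD pv.1 []).filter (fun g => decide (g ∈ tree))).map (fun g => (pv.1, g))
     else [])
    = pvBlock (PySem.Dict.mk p2g) tree pv := by
  unfold pvBlock
  by_cases hpv : pv.2 = []
  · simp [hpv]
  · rw [if_neg hpv]
    rw [PySem.Dict.getD_eq_get?_getD]
    cases h : (PySem.Dict.mk p2g).get? pv.1 with
    | none =>
        have hc : (PySem.Dict.mk p2g).contains pv.1 = false :=
          (PySem.Dict.get?_eq_none_iff_contains _ _).1 h
        simp [hpv, hc]
    | some gids =>
        cases hc : (PySem.Dict.mk p2g).contains pv.1 with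
        | false => rw [(PySem.Dict.get?_eq_none_iff_contains _ _).2 hc] at h; cases h
        | true => simp [hpv]

-- A's protein/go double loop is a fold over the flat occurrence list
theorem pvFoldl_occs {σ : Type} (pd p2g : List (String × List String)) (tree : List String)
    (step : σ → String × String → σ) (init : σ) :
    pd.foldl (fun st pv =>
      if pv.2 = [] then st
      else match (PySem.Dict.mk p2g).get? pv.1 with
        | none => st
        | some go_ids => go_ids.foldl (fun st g => if g ∈ tree then step st (pv.1, g) else st) st) init
    = (pvOccs pd p2g tree).foldl step init := by
  unfold pvOccs
  rw [List.foldl_flatMap]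
  have h : (fun (st : σ) (pv : String × List String) =>
      if pv.2 = [] then st
      else match (PySem.Dict.mk p2g).get? pv.1 with
        | none => st
        | some go_ids => go_ids.foldl (fun st g => if g ∈ tree then step st (pv.1, g) else st) st)
      = (fun st pv => (pvBlock (PySem.Dict.mk p2g) tree pv).foldl step st) := by
    funext st pv
    unfold pvBlock
    by_cases hpv : pv.2 = []
    · simp [hpv]
    · rw [if_neg hpv, if_neg hpv]
      cases (PySem.Dict.mk p2g).get? pv.1 with
      | none => rfl
      | some gids =>
        simp only []
        rw [List.foldl_map, List.foldl_filter]
        simp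
  rw [h]

-- a fold with four independent dict accumulators is four folds
theorem pvStepA_split (i2t : List (String × String)) (O : List (String × String))
    (a b : PySem.Dict String (List String)) (c d : PySem.Dict String Int) :
    O.foldl (pvStepA i2t) (a, b, c, d)
    = (O.foldl (fun d q => d.modify q.1 [] (fun v => v ++ [q.2])) a,
       O.foldl (fun d q => d.modify q.2 [] (fun v => v ++ [q.1])) b,
       O.foldl (fun d q => d.modify q.2 0 (fun c => c + 1)) c,
       O.foldl (fun d q => d.modify (pvTerm i2t q.2) 0 (fun c => c + 1)) d) := by
  induction O generalizing a b c d with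
  | nil => rfl
  | cons q O ih => exact ih _ _ _ _

-- A's grouping fold keyed by a projection, as items: dedup keys in first-occurrence order,
-- each paired with the gathered values — exactly B's comprehension
theorem pvGroup_items (O : List (String × String)) (key val : String × String → String) :
    (O.foldl (fun d q => d.modify (key q) [] (fun v => v ++ [val q])) PySem.Dict.empty).items
    = (PySem.Set.ofList (O.map key)).map
        (fun k => (k, (O.filter (fun q => key q == k)).map val)) := by
  have hkeys : (O.foldl (fun d q => d.modify (key q) [] (fun v => v ++ [val q])) PySem.Dict.empty).keys
      = PySem.Set.ofList (O.map key) := by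
    have hstep : (fun (d : PySem.Dict String (List String)) (q : String × String) =>
        d.modify (key q) [] (fun v => v ++ [val q]))
        = (fun d x => d.modify (key x) []
            ((fun (_ : PySem.Dict String (List String)) (q : String × String) (v : List String) => v ++ [val q]) d x)) := rfl
    rw [hstep, PySem.Dict.keys_foldl_modify_key, PySem.Dict.keys_empty, PySem.Set.update_nil_left]
  have hgetD : ∀ k, (O.foldl (fun d q => d.modify (key q) [] (fun v => v ++ [val q])) PySem.Dict.empty).getD k []
      = (O.filter (fun q => key q == k)).map val := by
    intro k
    have h := PySem.Dict.getD_foldl_modify_append (O.map (fun q => (key q, val q))) PySem.Dict.empty k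
    rw [List.foldl_map, List.filter_map, List.map_map] at h
    simp only [PySem.Dict.getD_empty, List.nil_append] at h
    exact h
  have hnodup : (O.foldl (fun d q => d.modify (key q) [] (fun v => v ++ [val q])) PySem.Dict.empty).keys.Nodup := by
    rw [hkeys]; exact PySem.Set.nodup_ofList _
  rw [PySem.Dict.items_eq_map_keys _ hnodup [], hkeys]
  apply List.map_congr_left
  intro k _
  rw [hgetD k]

-- A's counter folds produce counters
theorem pvCount_eq (key : String × String → String) (O : List (String × String)) :
    O.foldl (fun d q => d.modify (key q) 0 (fun c => c + 1)) PySem.Dict.empty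
    = PySem.Dict.counter (O.map key) := by
  rw [PySem.Dict.counter_eq_foldl, List.foldl_map]

theorem map_top_proteins2go_spec : Claim_equal_map_top_proteins2go := by
  intro pd p2g tree i2t _ _
  unfold Spec_map_top_proteins2go
  unfold map_top_proteins2go map_top_proteins2go_alt
  have hocc : (fun pv : String × List String =>
      if pv.2 ≠ [] ∧ (PySem.Dict.mk p2g).contains pv.1 then
        (((PySem.Dict.mk p2g).getD pv.1 []).filter (fun g => decide (g ∈ tree))).map (fun g => (pv.1, g))
      else []) = pvBlock (PySem.Dict.mk p2g) tree := by
    funext pv; exact pvBlock_eq p2g tree pv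
  simp only [pvFoldl_occs pd p2g tree (pvStepA i2t), pvStepA_split, hocc]
  have hO : pd.flatMap (pvBlock (PySem.Dict.mk p2g) tree) = pvOccs pd p2g tree := rfl
  rw [hO]
  rw [pvGroup_items (pvOccs pd p2g tree) (fun q => q.1) (fun q => q.2),
      pvGroup_items (pvOccs pd p2g tree) (fun q => q.2) (fun q => q.1),
      pvCount_eq (fun q => q.2), pvCount_eq (fun q => pvTerm i2t q.2),
      PySem.Dict.items_counter, PySem.Dict.items_counter]
  have hterms : (pvOccs pd p2g tree).map (fun q => pvTerm i2t q.2)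
      = ((pvOccs pd p2g tree).map (fun q => q.2)).map (fun g => pvTerm i2t g) := by
    rw [List.map_map]; rfl
  rw [hterms]
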